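-- pv_equiv track=rewrite | github.com/endritmurati99/mobile-picking-and-voice-assistant | Mobile Picking und Voice Assistant/backend/app/services/route_optimizer.py | _letters_to_rank
-- ===== SOURCE A (Python) =====
-- def _letters_to_rank(value: str) -> int:
--     if not value:
--         return 99
--     total = 0
--     for char in value.upper():
--         if "A" <= char <= "Z":
--             total = (total * 26) + (ord(char) - 64)
--     return total or 99
-- ===== SOURCE B (Python) =====
-- def _letters_to_rank(value: str) -> int:
--     if not value:
--         return 99
--     letters = [c for c in value.upper() if "A" <= c <= "Z"]
--     total = sum((ord(c) - 64) * 26 ** i for i, c in enumerate(reversed(letters)))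
--     return total or 99
-- ===== Notes on version B (the rewrite author's own statement) =====
-- stated objective: alternative
-- what changed: Replaces the Horner-style running accumulator (total*26 + digit inside the scan) by filtering the letters first and summing explicit positional weights (ord(c)-64)*26**i over the reversed letter list.
import Mathlib
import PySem

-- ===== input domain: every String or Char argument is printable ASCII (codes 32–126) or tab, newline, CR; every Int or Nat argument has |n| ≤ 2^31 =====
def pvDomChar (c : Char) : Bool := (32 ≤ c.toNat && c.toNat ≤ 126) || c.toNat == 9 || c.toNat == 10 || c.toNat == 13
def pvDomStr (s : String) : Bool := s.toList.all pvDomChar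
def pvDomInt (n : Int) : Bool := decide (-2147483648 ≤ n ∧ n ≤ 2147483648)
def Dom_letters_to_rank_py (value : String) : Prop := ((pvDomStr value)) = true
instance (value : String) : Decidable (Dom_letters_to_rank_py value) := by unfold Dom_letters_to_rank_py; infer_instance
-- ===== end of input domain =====

-- B replaces A's Horner-style running accumulator by a filter-then-positional-sum over the reversed letters (alternative decomposition, same cost).


-- ===== PORT A =====
def letters_to_rank_py (value : String) : Int :=
  if value.isEmpty then 99
  else
    let total : Int :=
      (PySem.Str.upper value).toList.foldl
        (fun total char =>
          if 'A' ≤ char ∧ char ≤ 'Z' then total * 26 + ((char.toNat : Int) - 64)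
          else total) 0
    if total = 0 then 99 else total

-- ===== PORT B =====
def letters_to_rank_py_alt (value : String) : Int :=
  if value.isEmpty then 99
  else
    let letters := (PySem.Str.upper value).toList.filter
      (fun c => decide ('A' ≤ c ∧ c ≤ 'Z'))
    let total : Int :=
      ((PySem.List.enumerate letters.reverse).map
        (fun p => ((p.2.toNat : Int) - 64) * 26 ^ p.1.toNat)).sum
    if total = 0 then 99 else total

-- ===== PRECONDITION & SPEC =====
def Spec_letters_to_rank_py (value : String) (out : Int) : Prop := out = letters_to_rank_py_alt value
instance (value : String) (out : Int) : Decidable (Spec_letters_to_rank_py value out) := by unfold Spec_letters_to_rank_py; infer_instance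

-- ===== CLAIM (what is proved, stated in full; the proofs are below) =====
def Claim_equal_letters_to_rank_py : Prop := ∀ (value : String), Dom_letters_to_rank_py value → Spec_letters_to_rank_py value (letters_to_rank_py value)

-- ===== LEMMAS AND PROOFS =====

-- positional sum of a letter list (B's inner total, on an arbitrary list)
def pvPosSum (m : List Char) : Int :=
  ((PySem.List.enumerate m.reverse).map
    (fun p => ((p.2.toNat : Int) - 64) * 26 ^ p.1.toNat)).sum

theorem pvPosSum_nil : pvPosSum [] = 0 := by simp [pvPosSum]

theorem pvPosSum_cons (c : Char) (m : List Char) :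
    pvPosSum (c :: m) = pvPosSum m + ((c.toNat : Int) - 64) * 26 ^ m.length := by
  simp [pvPosSum, PySem.List.enumerate_append, PySem.List.enumerate]

-- Horner fold on a pre-filtered list equals its positional sum
theorem horner_eq_posSum (m : List Char) (a : Int) :
    m.foldl (fun t c => t * 26 + ((c.toNat : Int) - 64)) a
      = a * 26 ^ m.length + pvPosSum m := by
  induction m generalizing a with
  | nil => simp [pvPosSum_nil]
  | cons c m ih =>
      simp only [List.foldl_cons, ih, pvPosSum_cons, List.length_cons]
      ring

-- A's guarded fold equals the plain Horner fold over the filtered list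
theorem guarded_foldl_eq_filter (l : List Char) (a : Int) :
    l.foldl (fun t c => if 'A' ≤ c ∧ c ≤ 'Z' then t * 26 + ((c.toNat : Int) - 64) else t) a
      = (l.filter (fun c => decide ('A' ≤ c ∧ c ≤ 'Z'))).foldl
          (fun t c => t * 26 + ((c.toNat : Int) - 64)) a := by
  induction l generalizing a with
  | nil => rfl
  | cons c l ih =>
      by_cases h : 'A' ≤ c ∧ c ≤ 'Z' <;> simp [h, ih]

-- ===== VERDICT (by name: the statement is the Claim_ definition above) =====
theorem letters_to_rank_py_spec : Claim_equal_letters_to_rank_py := by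
  intro value _
  unfold Spec_letters_to_rank_py letters_to_rank_py letters_to_rank_py_alt
  by_cases he : value.isEmpty
  · simp [he]
  · simp only [he]
    rw [guarded_foldl_eq_filter, horner_eq_posSum]
    simp [pvPosSum]
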